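-- pv_equiv track=rewrite | github.com/beatovk/planner | packages/wp_tags/mapper.py | categories_to_facets
-- ===== SOURCE A (Python) =====
-- from typing import Dict, Set, List
--
-- def categories_to_facets(selected_category_ids: list[str]) -> Dict[str, Set[str]]:
--     """
--     Translate user categories into cache/search facets.
--
--     Args:
--         selected_category_ids: List of category IDs from user selection
--
--     Returns:
--         Dict with "flags" and "categories" sets
--     """
--     # Алиасы для категорий
--     category_aliases = {
--         "art": {"art_exhibits", "culture"},
--         "art_exhibits": {"art", "culture"},
--         "culture": {"art", "art_exhibits"},
--         "music": {"electronic_music", "live_music_gigs", "jazz_blues"},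
--         "nightlife": {"electronic_music", "rooftops_bars", "bars"},
--         "wellness": {"yoga_wellness", "parks_walks"},
--         "food_drinks": {"food", "rooftops_bars"},
--         "entertainment": {"cinema", "markets_fairs", "workshops"}
--     }
--
--     # Флаги для категорий
--     category_flags = {
--         "art_exhibits": {"art", "culture"},
--         "electronic_music": {"music", "nightlife"},
--         "live_music_gigs": {"music", "live"},
--         "jazz_blues": {"music", "live"},
--         "rooftops_bars": {"nightlife", "food_drinks"},
--         "food": {"food_drinks"},
--         "workshops": {"entertainment", "learning"},
--         "cinema": {"entertainment"},
--         "markets_fairs": {"entertainment", "shopping"},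
--         "yoga_wellness": {"wellness", "health"},
--         "parks_walks": {"wellness", "outdoor"}
--     }
--
--     # Собираем все флаги и категории
--     flags: Set[str] = set()
--     categories: Set[str] = set()
--
--     for cat_id in selected_category_ids:
--         cat_id_lower = cat_id.lower()
--
--         # Добавляем основную категорию
--         categories.add(cat_id_lower)
--
--         # Добавляем флаги для категории
--         if cat_id_lower in category_flags:
--             flags.update(category_flags[cat_id_lower])
--
--         # Добавляем алиасы
--         if cat_id_lower in category_aliases:
--             categories.update(category_aliases[cat_id_lower])
--             # Для алиасов тоже добавляем флаги
--             for alias in category_aliases[cat_id_lower]: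
--                 if alias in category_flags:
--                     flags.update(category_flags[alias])
--
--     return {
--         "flags": flags,
--         "categories": categories
--     }
-- ===== SOURCE B (Python) =====
-- from typing import Dict, Set
--
-- # Precomputed one-level expansion: aliases per category, and the merged flag set
-- # (own flags plus the flags of every alias), so the loop body is branch-free.
-- _ALIASES = {
--     "art": {"art_exhibits", "culture"},
--     "art_exhibits": {"art", "culture"},
--     "culture": {"art", "art_exhibits"},
--     "music": {"electronic_music", "live_music_gigs", "jazz_blues"},
--     "nightlife": {"electronic_music", "rooftops_bars", "bars"},
--     "wellness": {"yoga_wellness", "parks_walks"},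
--     "food_drinks": {"food", "rooftops_bars"},
--     "entertainment": {"cinema", "markets_fairs", "workshops"},
-- }
--
-- _MERGED_FLAGS = {
--     "art": {"art", "culture"},
--     "art_exhibits": {"art", "culture"},
--     "culture": {"art", "culture"},
--     "music": {"music", "nightlife", "live"},
--     "nightlife": {"music", "nightlife", "food_drinks"},
--     "wellness": {"wellness", "health", "outdoor"},
--     "food_drinks": {"food_drinks", "nightlife"},
--     "entertainment": {"entertainment", "shopping", "learning"},
--     "electronic_music": {"music", "nightlife"},
--     "live_music_gigs": {"music", "live"},
--     "jazz_blues": {"music", "live"},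
--     "rooftops_bars": {"nightlife", "food_drinks"},
--     "food": {"food_drinks"},
--     "workshops": {"entertainment", "learning"},
--     "cinema": {"entertainment"},
--     "markets_fairs": {"entertainment", "shopping"},
--     "yoga_wellness": {"wellness", "health"},
--     "parks_walks": {"wellness", "outdoor"},
-- }
--
-- _EMPTY: Set[str] = frozenset()
--
--
-- def categories_to_facets(selected_category_ids: list[str]) -> Dict[str, Set[str]]:
--     flags: Set[str] = set()
--     categories: Set[str] = set()
--     for cat_id in selected_category_ids:
--         c = cat_id.lower()
--         categories.add(c)
--         categories |= _ALIASES.get(c, _EMPTY)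
--         flags |= _MERGED_FLAGS.get(c, _EMPTY)
--     return {"flags": flags, "categories": categories}
-- ===== Notes on version B (the rewrite author's own statement) =====
-- stated objective: simpler
-- what changed: B precomputes, per category id, the one-level alias expansion and the merged flag set (own flags plus the flags of every alias), so the loop body becomes two branch-free table lookups instead of A's membership tests and inner alias-to-flag loop.
import Mathlib
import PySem

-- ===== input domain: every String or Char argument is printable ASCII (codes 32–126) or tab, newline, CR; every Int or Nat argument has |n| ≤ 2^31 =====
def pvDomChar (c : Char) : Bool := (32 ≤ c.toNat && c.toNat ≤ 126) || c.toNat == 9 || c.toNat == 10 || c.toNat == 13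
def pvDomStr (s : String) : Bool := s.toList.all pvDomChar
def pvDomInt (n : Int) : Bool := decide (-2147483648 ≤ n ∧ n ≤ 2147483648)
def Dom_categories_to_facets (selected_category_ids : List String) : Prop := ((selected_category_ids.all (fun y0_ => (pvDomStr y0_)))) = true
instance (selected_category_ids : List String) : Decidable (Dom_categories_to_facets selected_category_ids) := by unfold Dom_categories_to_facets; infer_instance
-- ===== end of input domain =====

-- B replaces A's per-item membership tests and inner alias→flag loop by a single
-- precomputed merged-flags lookup table, making the loop body branch-free (objective: simpler).


-- ===== PORT A =====
def categoryAliasesA : PySem.Dict String (List String) := PySem.Dict.mk [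
  ("art", PySem.Set.ofList ["art_exhibits", "culture"]),
  ("art_exhibits", PySem.Set.ofList ["art", "culture"]),
  ("culture", PySem.Set.ofList ["art", "art_exhibits"]),
  ("music", PySem.Set.ofList ["electronic_music", "live_music_gigs", "jazz_blues"]),
  ("nightlife", PySem.Set.ofList ["electronic_music", "rooftops_bars", "bars"]),
  ("wellness", PySem.Set.ofList ["yoga_wellness", "parks_walks"]),
  ("food_drinks", PySem.Set.ofList ["food", "rooftops_bars"]),
  ("entertainment", PySem.Set.ofList ["cinema", "markets_fairs", "workshops"])]

def categoryFlagsA : PySem.Dict String (List String) := PySem.Dict.mk [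
  ("art_exhibits", PySem.Set.ofList ["art", "culture"]),
  ("electronic_music", PySem.Set.ofList ["music", "nightlife"]),
  ("live_music_gigs", PySem.Set.ofList ["music", "live"]),
  ("jazz_blues", PySem.Set.ofList ["music", "live"]),
  ("rooftops_bars", PySem.Set.ofList ["nightlife", "food_drinks"]),
  ("food", PySem.Set.ofList ["food_drinks"]),
  ("workshops", PySem.Set.ofList ["entertainment", "learning"]),
  ("cinema", PySem.Set.ofList ["entertainment"]),
  ("markets_fairs", PySem.Set.ofList ["entertainment", "shopping"]),
  ("yoga_wellness", PySem.Set.ofList ["wellness", "health"]),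
  ("parks_walks", PySem.Set.ofList ["wellness", "outdoor"])]

-- loop body of A: state is (flags, categories)
def stepA (st : List String × List String) (cat_id : String) : List String × List String :=
  let catIdLower := PySem.Str.lower cat_id
  let categories := PySem.Set.add st.2 catIdLower
  let flags :=
    match categoryFlagsA.get? catIdLower with
    | some fs => PySem.Set.update st.1 fs
    | none => st.1
  match categoryAliasesA.get? catIdLower with
  | some als =>
    let categories := PySem.Set.update categories als
    let flags := als.foldl (fun f alias_ =>
        match categoryFlagsA.get? alias_ with
        | some fs => PySem.Set.update f fs
        | none => f) flags
    (flags, categories)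
  | none => (flags, categories)

def categories_to_facets (selected_category_ids : List String) : List (String × List String) :=
  let st := selected_category_ids.foldl stepA (PySem.Set.empty, PySem.Set.empty)
  [("flags", st.1), ("categories", st.2)]

-- ===== PORT B =====

def mergedFlagsB : PySem.Dict String (List String) := PySem.Dict.mk [
  ("art", PySem.Set.ofList ["art", "culture"]),
  ("art_exhibits", PySem.Set.ofList ["art", "culture"]),
  ("culture", PySem.Set.ofList ["art", "culture"]),
  ("music", PySem.Set.ofList ["music", "nightlife", "live"]),
  ("nightlife", PySem.Set.ofList ["music", "nightlife", "food_drinks"]),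
  ("wellness", PySem.Set.ofList ["wellness", "health", "outdoor"]),
  ("food_drinks", PySem.Set.ofList ["food_drinks", "nightlife"]),
  ("entertainment", PySem.Set.ofList ["entertainment", "shopping", "learning"]),
  ("electronic_music", PySem.Set.ofList ["music", "nightlife"]),
  ("live_music_gigs", PySem.Set.ofList ["music", "live"]),
  ("jazz_blues", PySem.Set.ofList ["music", "live"]),
  ("rooftops_bars", PySem.Set.ofList ["nightlife", "food_drinks"]),
  ("food", PySem.Set.ofList ["food_drinks"]),
  ("workshops", PySem.Set.ofList ["entertainment", "learning"]),
  ("cinema", PySem.Set.ofList ["entertainment"]),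
  ("markets_fairs", PySem.Set.ofList ["entertainment", "shopping"]),
  ("yoga_wellness", PySem.Set.ofList ["wellness", "health"]),
  ("parks_walks", PySem.Set.ofList ["wellness", "outdoor"])]

-- branch-free loop body of B
def stepB (st : List String × List String) (cat_id : String) : List String × List String :=
  let c := PySem.Str.lower cat_id
  (PySem.Set.update st.1 (mergedFlagsB.getD c PySem.Set.empty),
   PySem.Set.update (PySem.Set.add st.2 c) (categoryAliasesA.getD c PySem.Set.empty))

def categories_to_facets_alt (selected_category_ids : List String) : List (String × List String) :=
  let st := selected_category_ids.foldl stepB (PySem.Set.empty, PySem.Set.empty)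
  [("flags", st.1), ("categories", st.2)]

-- ===== PRECONDITION & SPEC =====
def Spec_categories_to_facets (selected_category_ids : List String) (out : List (String × List String)) : Prop := out = categories_to_facets_alt selected_category_ids
instance (selected_category_ids : List String) (out : List (String × List String)) : Decidable (Spec_categories_to_facets selected_category_ids out) := by unfold Spec_categories_to_facets; infer_instance

-- ===== CLAIM (what is proved, stated in full; the proofs are below) =====
def Claim_equal_categories_to_facets : Prop := ∀ (selected_category_ids : List String), Dom_categories_to_facets selected_category_ids → Spec_categories_to_facets selected_category_ids (categories_to_facets selected_category_ids)

-- ===== LEMMAS AND PROOFS =====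
theorem fA_art : categoryFlagsA.get? "art" = none := by decide
theorem aA_art : categoryAliasesA.get? "art" = some ["art_exhibits", "culture"] := by decide
theorem aB_art : categoryAliasesA.getD "art" ([] : List String) = ["art_exhibits", "culture"] := by decide
theorem mB_art : mergedFlagsB.getD "art" ([] : List String) = ["art", "culture"] := by decide
theorem fA_artexhibits : categoryFlagsA.get? "art_exhibits" = some ["art", "culture"] := by decide
theorem aA_artexhibits : categoryAliasesA.get? "art_exhibits" = some ["art", "culture"] := by decide
theorem aB_artexhibits : categoryAliasesA.getD "art_exhibits" ([] : List String) = ["art", "culture"] := by decide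
theorem mB_artexhibits : mergedFlagsB.getD "art_exhibits" ([] : List String) = ["art", "culture"] := by decide
theorem fA_culture : categoryFlagsA.get? "culture" = none := by decide
theorem aA_culture : categoryAliasesA.get? "culture" = some ["art", "art_exhibits"] := by decide
theorem aB_culture : categoryAliasesA.getD "culture" ([] : List String) = ["art", "art_exhibits"] := by decide
theorem mB_culture : mergedFlagsB.getD "culture" ([] : List String) = ["art", "culture"] := by decide
theorem fA_music : categoryFlagsA.get? "music" = none := by decide
theorem aA_music : categoryAliasesA.get? "music" = some ["electronic_music", "live_music_gigs", "jazz_blues"] := by decide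
theorem aB_music : categoryAliasesA.getD "music" ([] : List String) = ["electronic_music", "live_music_gigs", "jazz_blues"] := by decide
theorem mB_music : mergedFlagsB.getD "music" ([] : List String) = ["music", "nightlife", "live"] := by decide
theorem fA_nightlife : categoryFlagsA.get? "nightlife" = none := by decide
theorem aA_nightlife : categoryAliasesA.get? "nightlife" = some ["electronic_music", "rooftops_bars", "bars"] := by decide
theorem aB_nightlife : categoryAliasesA.getD "nightlife" ([] : List String) = ["electronic_music", "rooftops_bars", "bars"] := by decide
theorem mB_nightlife : mergedFlagsB.getD "nightlife" ([] : List String) = ["music", "nightlife", "food_drinks"] := by decide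
theorem fA_wellness : categoryFlagsA.get? "wellness" = none := by decide
theorem aA_wellness : categoryAliasesA.get? "wellness" = some ["yoga_wellness", "parks_walks"] := by decide
theorem aB_wellness : categoryAliasesA.getD "wellness" ([] : List String) = ["yoga_wellness", "parks_walks"] := by decide
theorem mB_wellness : mergedFlagsB.getD "wellness" ([] : List String) = ["wellness", "health", "outdoor"] := by decide
theorem fA_fooddrinks : categoryFlagsA.get? "food_drinks" = none := by decide
theorem aA_fooddrinks : categoryAliasesA.get? "food_drinks" = some ["food", "rooftops_bars"] := by decide
theorem aB_fooddrinks : categoryAliasesA.getD "food_drinks" ([] : List String) = ["food", "rooftops_bars"] := by decide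
theorem mB_fooddrinks : mergedFlagsB.getD "food_drinks" ([] : List String) = ["food_drinks", "nightlife"] := by decide
theorem fA_entertainment : categoryFlagsA.get? "entertainment" = none := by decide
theorem aA_entertainment : categoryAliasesA.get? "entertainment" = some ["cinema", "markets_fairs", "workshops"] := by decide
theorem aB_entertainment : categoryAliasesA.getD "entertainment" ([] : List String) = ["cinema", "markets_fairs", "workshops"] := by decide
theorem mB_entertainment : mergedFlagsB.getD "entertainment" ([] : List String) = ["entertainment", "shopping", "learning"] := by decide
theorem fA_electronicmusic : categoryFlagsA.get? "electronic_music" = some ["music", "nightlife"] := by decide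
theorem aA_electronicmusic : categoryAliasesA.get? "electronic_music" = none := by decide
theorem aB_electronicmusic : categoryAliasesA.getD "electronic_music" ([] : List String) = [] := by decide
theorem mB_electronicmusic : mergedFlagsB.getD "electronic_music" ([] : List String) = ["music", "nightlife"] := by decide
theorem fA_livemusicgigs : categoryFlagsA.get? "live_music_gigs" = some ["music", "live"] := by decide
theorem aA_livemusicgigs : categoryAliasesA.get? "live_music_gigs" = none := by decide
theorem aB_livemusicgigs : categoryAliasesA.getD "live_music_gigs" ([] : List String) = [] := by decide
theorem mB_livemusicgigs : mergedFlagsB.getD "live_music_gigs" ([] : List String) = ["music", "live"] := by decide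
theorem fA_jazzblues : categoryFlagsA.get? "jazz_blues" = some ["music", "live"] := by decide
theorem aA_jazzblues : categoryAliasesA.get? "jazz_blues" = none := by decide
theorem aB_jazzblues : categoryAliasesA.getD "jazz_blues" ([] : List String) = [] := by decide
theorem mB_jazzblues : mergedFlagsB.getD "jazz_blues" ([] : List String) = ["music", "live"] := by decide
theorem fA_rooftopsbars : categoryFlagsA.get? "rooftops_bars" = some ["nightlife", "food_drinks"] := by decide
theorem aA_rooftopsbars : categoryAliasesA.get? "rooftops_bars" = none := by decide
theorem aB_rooftopsbars : categoryAliasesA.getD "rooftops_bars" ([] : List String) = [] := by decide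
theorem mB_rooftopsbars : mergedFlagsB.getD "rooftops_bars" ([] : List String) = ["nightlife", "food_drinks"] := by decide
theorem fA_food : categoryFlagsA.get? "food" = some ["food_drinks"] := by decide
theorem aA_food : categoryAliasesA.get? "food" = none := by decide
theorem aB_food : categoryAliasesA.getD "food" ([] : List String) = [] := by decide
theorem mB_food : mergedFlagsB.getD "food" ([] : List String) = ["food_drinks"] := by decide
theorem fA_workshops : categoryFlagsA.get? "workshops" = some ["entertainment", "learning"] := by decide
theorem aA_workshops : categoryAliasesA.get? "workshops" = none := by decide
theorem aB_workshops : categoryAliasesA.getD "workshops" ([] : List String) = [] := by decide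
theorem mB_workshops : mergedFlagsB.getD "workshops" ([] : List String) = ["entertainment", "learning"] := by decide
theorem fA_cinema : categoryFlagsA.get? "cinema" = some ["entertainment"] := by decide
theorem aA_cinema : categoryAliasesA.get? "cinema" = none := by decide
theorem aB_cinema : categoryAliasesA.getD "cinema" ([] : List String) = [] := by decide
theorem mB_cinema : mergedFlagsB.getD "cinema" ([] : List String) = ["entertainment"] := by decide
theorem fA_marketsfairs : categoryFlagsA.get? "markets_fairs" = some ["entertainment", "shopping"] := by decide
theorem aA_marketsfairs : categoryAliasesA.get? "markets_fairs" = none := by decide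
theorem aB_marketsfairs : categoryAliasesA.getD "markets_fairs" ([] : List String) = [] := by decide
theorem mB_marketsfairs : mergedFlagsB.getD "markets_fairs" ([] : List String) = ["entertainment", "shopping"] := by decide
theorem fA_yogawellness : categoryFlagsA.get? "yoga_wellness" = some ["wellness", "health"] := by decide
theorem aA_yogawellness : categoryAliasesA.get? "yoga_wellness" = none := by decide
theorem aB_yogawellness : categoryAliasesA.getD "yoga_wellness" ([] : List String) = [] := by decide
theorem mB_yogawellness : mergedFlagsB.getD "yoga_wellness" ([] : List String) = ["wellness", "health"] := by decide
theorem fA_parkswalks : categoryFlagsA.get? "parks_walks" = some ["wellness", "outdoor"] := by decide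
theorem aA_parkswalks : categoryAliasesA.get? "parks_walks" = none := by decide
theorem aB_parkswalks : categoryAliasesA.getD "parks_walks" ([] : List String) = [] := by decide
theorem mB_parkswalks : mergedFlagsB.getD "parks_walks" ([] : List String) = ["wellness", "outdoor"] := by decide
theorem fA_bars : categoryFlagsA.get? "bars" = none := by decide

theorem step_eq (st : List String × List String) (cat_id : String) : stepA st cat_id = stepB st cat_id := by
  unfold stepA stepB
  generalize PySem.Str.lower cat_id = l
  by_cases h1 : l = "art"
  · subst h1
    simp [List.foldl, aA_art, aB_art, fA_art, fA_artexhibits, fA_culture, mB_art, PySem.Set.update, PySem.Set.add_of_mem, PySem.Set.mem_add]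
  by_cases h2 : l = "art_exhibits"
  · subst h2
    simp [List.foldl, aA_artexhibits, aB_artexhibits, fA_art, fA_artexhibits, fA_culture, mB_artexhibits, PySem.Set.update, PySem.Set.add_of_mem, PySem.Set.mem_add]
  by_cases h3 : l = "culture"
  · subst h3
    simp [List.foldl, aA_culture, aB_culture, fA_art, fA_artexhibits, fA_culture, mB_culture, PySem.Set.update, PySem.Set.add_of_mem, PySem.Set.mem_add]
  by_cases h4 : l = "music"
  · subst h4
    simp [List.foldl, aA_music, aB_music, fA_electronicmusic, fA_jazzblues, fA_livemusicgigs, fA_music, mB_music, PySem.Set.update, PySem.Set.add_of_mem, PySem.Set.mem_add]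
  by_cases h5 : l = "nightlife"
  · subst h5
    simp [List.foldl, aA_nightlife, aB_nightlife, fA_bars, fA_electronicmusic, fA_nightlife, fA_rooftopsbars, mB_nightlife, PySem.Set.update, PySem.Set.add_of_mem, PySem.Set.mem_add]
  by_cases h6 : l = "wellness"
  · subst h6
    simp [List.foldl, aA_wellness, aB_wellness, fA_parkswalks, fA_wellness, fA_yogawellness, mB_wellness, PySem.Set.update, PySem.Set.add_of_mem, PySem.Set.mem_add]
  by_cases h7 : l = "food_drinks"
  · subst h7
    simp [List.foldl, aA_fooddrinks, aB_fooddrinks, fA_food, fA_fooddrinks, fA_rooftopsbars, mB_fooddrinks, PySem.Set.update, PySem.Set.add_of_mem, PySem.Set.mem_add]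
  by_cases h8 : l = "entertainment"
  · subst h8
    simp [List.foldl, aA_entertainment, aB_entertainment, fA_cinema, fA_entertainment, fA_marketsfairs, fA_workshops, mB_entertainment, PySem.Set.update, PySem.Set.add_of_mem, PySem.Set.mem_add]
  by_cases h9 : l = "electronic_music"
  · subst h9
    simp [List.foldl, aA_electronicmusic, aB_electronicmusic, fA_electronicmusic, mB_electronicmusic, PySem.Set.update, PySem.Set.add_of_mem, PySem.Set.mem_add]
  by_cases h10 : l = "live_music_gigs"
  · subst h10
    simp [List.foldl, aA_livemusicgigs, aB_livemusicgigs, fA_livemusicgigs, mB_livemusicgigs, PySem.Set.update, PySem.Set.add_of_mem, PySem.Set.mem_add]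
  by_cases h11 : l = "jazz_blues"
  · subst h11
    simp [List.foldl, aA_jazzblues, aB_jazzblues, fA_jazzblues, mB_jazzblues, PySem.Set.update, PySem.Set.add_of_mem, PySem.Set.mem_add]
  by_cases h12 : l = "rooftops_bars"
  · subst h12
    simp [List.foldl, aA_rooftopsbars, aB_rooftopsbars, fA_rooftopsbars, mB_rooftopsbars, PySem.Set.update, PySem.Set.add_of_mem, PySem.Set.mem_add]
  by_cases h13 : l = "food"
  · subst h13
    simp [List.foldl, aA_food, aB_food, fA_food, mB_food, PySem.Set.update, PySem.Set.add_of_mem, PySem.Set.mem_add]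
  by_cases h14 : l = "workshops"
  · subst h14
    simp [List.foldl, aA_workshops, aB_workshops, fA_workshops, mB_workshops, PySem.Set.update, PySem.Set.add_of_mem, PySem.Set.mem_add]
  by_cases h15 : l = "cinema"
  · subst h15
    simp [List.foldl, aA_cinema, aB_cinema, fA_cinema, mB_cinema, PySem.Set.update, PySem.Set.add_of_mem, PySem.Set.mem_add]
  by_cases h16 : l = "markets_fairs"
  · subst h16
    simp [List.foldl, aA_marketsfairs, aB_marketsfairs, fA_marketsfairs, mB_marketsfairs, PySem.Set.update, PySem.Set.add_of_mem, PySem.Set.mem_add]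
  by_cases h17 : l = "yoga_wellness"
  · subst h17
    simp [List.foldl, aA_yogawellness, aB_yogawellness, fA_yogawellness, mB_yogawellness, PySem.Set.update, PySem.Set.add_of_mem, PySem.Set.mem_add]
  by_cases h18 : l = "parks_walks"
  · subst h18
    simp [List.foldl, aA_parkswalks, aB_parkswalks, fA_parkswalks, mB_parkswalks, PySem.Set.update, PySem.Set.add_of_mem, PySem.Set.mem_add]
  have hf : categoryFlagsA.get? l = none := by
    rw [PySem.Dict.get?_eq_none_iff_not_mem_keys]
    simp [categoryFlagsA, PySem.Dict.keys, h2, h9, h10, h11, h12, h13, h14, h15, h16, h17, h18]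
  have ha : categoryAliasesA.get? l = none := by
    rw [PySem.Dict.get?_eq_none_iff_not_mem_keys]
    simp [categoryAliasesA, PySem.Dict.keys, h1, h2, h3, h4, h5, h6, h7, h8]
  have hb : categoryAliasesA.getD l ([] : List String) = [] := by
    apply PySem.Dict.getD_of_not_contains
    simp only [categoryAliasesA, PySem.Dict.contains_mk]
    simp only [List.any_cons, List.any_nil, Bool.or_eq_false_iff, beq_eq_false_iff_ne, ne_eq]
    exact ⟨fun e => h1 e.symm, fun e => h2 e.symm, fun e => h3 e.symm, fun e => h4 e.symm, fun e => h5 e.symm, fun e => h6 e.symm, fun e => h7 e.symm, fun e => h8 e.symm, trivial⟩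
  have hm : mergedFlagsB.getD l ([] : List String) = [] := by
    apply PySem.Dict.getD_of_not_contains
    simp only [mergedFlagsB, PySem.Dict.contains_mk]
    simp only [List.any_cons, List.any_nil, Bool.or_eq_false_iff, beq_eq_false_iff_ne, ne_eq]
    exact ⟨fun e => h1 e.symm, fun e => h2 e.symm, fun e => h3 e.symm, fun e => h4 e.symm, fun e => h5 e.symm, fun e => h6 e.symm, fun e => h7 e.symm, fun e => h8 e.symm, fun e => h9 e.symm, fun e => h10 e.symm, fun e => h11 e.symm, fun e => h12 e.symm, fun e => h13 e.symm, fun e => h14 e.symm, fun e => h15 e.symm, fun e => h16 e.symm, fun e => h17 e.symm, fun e => h18 e.symm, trivial⟩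
  simp [hf, ha, hb, hm, PySem.Set.update]

theorem steps_eq : stepA = stepB := funext fun st => funext (step_eq st)

-- ===== VERDICT (by name: the statement is the Claim_ definition above) =====
theorem categories_to_facets_spec : Claim_equal_categories_to_facets := by
  intro sel _
  unfold Spec_categories_to_facets categories_to_facets categories_to_facets_alt
  rw [steps_eq]
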